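-- pv_equiv track=rewrite | github.com/eunomia-bpf/ebpf-verifier-agent | interface/extractor/proof_engine.py | _select_carrier_result
-- ===== SOURCE A (Python) =====
-- def _select_carrier_result(
--     evaluations: list[tuple[str, str, str]],
-- ) -> tuple[str | None, str, str]:
--     for register, result, witness in evaluations:
--         if result == "satisfied":
--             return register, result, witness
--     for register, result, witness in evaluations:
--         if result == "violated":
--             return register, result, witness
--     register, result, witness = evaluations[0]
--     return register, result, witness
-- ===== SOURCE B (Python) =====
-- def _select_carrier_result(
--     evaluations: list[tuple[str, str, str]],
-- ) -> tuple[str | None, str, str]: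
--     rank = {"satisfied": 0, "violated": 1}
--     return min(evaluations, key=lambda e: rank.get(e[1], 2))
-- ===== Notes on version B (the rewrite author's own statement) =====
-- stated objective: idiomatic
-- what changed: Replaces A's two staged full scans plus indexed fallback with a single min() over a priority ranking (satisfied=0, violated=1, other=2); Python's min keeps the first element of minimal rank, which reproduces A's selection exactly.
import Mathlib
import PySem

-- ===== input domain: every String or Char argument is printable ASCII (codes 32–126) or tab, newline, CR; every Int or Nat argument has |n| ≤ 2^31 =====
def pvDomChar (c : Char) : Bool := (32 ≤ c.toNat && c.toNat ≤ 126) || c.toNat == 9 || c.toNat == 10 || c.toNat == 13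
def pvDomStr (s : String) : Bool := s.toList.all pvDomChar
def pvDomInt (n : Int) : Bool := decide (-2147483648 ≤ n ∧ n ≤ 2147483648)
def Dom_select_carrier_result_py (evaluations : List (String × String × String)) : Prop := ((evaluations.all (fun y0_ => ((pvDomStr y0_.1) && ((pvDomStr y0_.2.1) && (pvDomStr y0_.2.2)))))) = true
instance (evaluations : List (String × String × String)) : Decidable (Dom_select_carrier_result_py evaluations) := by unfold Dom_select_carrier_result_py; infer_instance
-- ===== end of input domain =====

-- B replaces A's two staged scans + indexed fallback with a single min() over a priority rank (objective: idiomatic).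


-- ===== PORT A =====
-- one 'for … if result == r: return' loop of A (used once with "satisfied", once with "violated")
def pvScanA (r : String) : List (String × String × String) → Option (String × String × String)
  | [] => none
  | t :: ts => if t.2.1 == r then some t else pvScanA r ts

def select_carrier_result_py (evaluations : List (String × String × String)) : String × String × String :=
  match pvScanA "satisfied" evaluations with
  | some t => t
  | none =>
    match pvScanA "violated" evaluations with
    | some t => t
    | none => (PySem.List.pyGet? evaluations 0).getD ("", "", "")  -- evaluations[0]; none (IndexError) excluded by Pre_

-- ===== PORT B =====
-- rank = {"satisfied": 0, "violated": 1}
def pvRankDict : PySem.Dict String Nat := PySem.Dict.ofList [("satisfied", 0), ("violated", 1)]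
-- the key lambda: rank.get(e[1], 2)
def pvKeyB (e : String × String × String) : Nat := PySem.Dict.getD pvRankDict e.2.1 2

def select_carrier_result_py_alt (evaluations : List (String × String × String)) : String × String × String :=
  (PySem.List.min? evaluations pvKeyB).getD ("", "", "")  -- min([]) raises ValueError; empty input excluded by Pre_

-- ===== PRECONDITION & SPEC =====
-- Pre_ excludes only the empty list, on which A raises IndexError (and B raises ValueError).
def Pre_select_carrier_result_py (evaluations : List (String × String × String)) : Prop := evaluations ≠ []
instance (evaluations : List (String × String × String)) : Decidable (Pre_select_carrier_result_py evaluations) := by unfold Pre_select_carrier_result_py; infer_instance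
def pvWitness_select_carrier_result_py : (List (String × String × String)) := [("r0", "violated", "w")]

def Spec_select_carrier_result_py (evaluations : List (String × String × String)) (out : String × String × String) : Prop := out = select_carrier_result_py_alt evaluations
instance (evaluations : List (String × String × String)) (out : String × String × String) : Decidable (Spec_select_carrier_result_py evaluations out) := by unfold Spec_select_carrier_result_py; infer_instance

-- ===== CLAIM (what is proved, stated in full; the proofs are below) =====
def Claim_equal_select_carrier_result_py : Prop := ∀ (evaluations : List (String × String × String)), Dom_select_carrier_result_py evaluations → Pre_select_carrier_result_py evaluations → Spec_select_carrier_result_py evaluations (select_carrier_result_py evaluations)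

-- ===== LEMMAS AND PROOFS =====
-- the rank key in closed form
theorem pvKeyB_eq (e : String × String × String) :
    pvKeyB e = if e.2.1 == "satisfied" then 0 else if e.2.1 == "violated" then 1 else 2 := by
  obtain ⟨a, r, w⟩ := e
  simp only [pvKeyB]
  by_cases hs : r = "satisfied"
  · subst hs; rfl
  · by_cases hv : r = "violated"
    · subst hv; rfl
    · have h1 : ("satisfied" == r) = false := by simp [Ne.symm hs]
      have h2 : ("violated" == r) = false := by simp [Ne.symm hv]
      simp [pvRankDict, PySem.Dict.getD, PySem.Dict.get?, PySem.Dict.ofList, PySem.Dict.empty,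
        PySem.Dict.update, PySem.Dict.insert, PySem.Dict.contains, List.find?, h1, h2, hs, hv]

-- one fold step of min?: absorb the second element into the accumulator
theorem pvMin_cons_cons (m t : String × String × String) (ts : List (String × String × String)) :
    PySem.List.min? (m :: t :: ts) pvKeyB =
      PySem.List.min? ((if pvKeyB t < pvKeyB m then t else m) :: ts) pvKeyB := by
  by_cases h : pvKeyB t < pvKeyB m <;> simp [PySem.List.min?, List.foldl_cons, h]

-- min? with a nonempty head, characterised by A's staged scans over the tail
theorem pvMinFold (l : List (String × String × String)) :
    ∀ (m : String × String × String), pvKeyB m ≤ 2 →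
      PySem.List.min? (m :: l) pvKeyB =
        (if pvKeyB m = 0 then some m
         else if pvKeyB m = 1 then (pvScanA "satisfied" l).or (some m)
         else (pvScanA "satisfied" l).or ((pvScanA "violated" l).or (some m))) := by
  induction l with
  | nil =>
    intro m _
    split_ifs <;> simp [PySem.List.min?, pvScanA]
  | cons t ts ih =>
    intro m hm
    rw [pvMin_cons_cons]
    have ht := pvKeyB_eq t
    by_cases hts : t.2.1 == "satisfied"
    · have htk : pvKeyB t = 0 := by simp [ht, hts]
      by_cases hm0 : pvKeyB m = 0
      · have hlt : ¬ pvKeyB t < pvKeyB m := by omega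
        rw [if_neg hlt, ih m hm, if_pos hm0, if_pos hm0]
      · have hlt : pvKeyB t < pvKeyB m := by omega
        rw [if_pos hlt, ih t (by omega), if_pos htk]
        have hscan : pvScanA "satisfied" (t :: ts) = some t := by simp [pvScanA, hts]
        rw [if_neg hm0, hscan]
        split_ifs <;> simp
    · by_cases htv : t.2.1 == "violated"
      · have htk : pvKeyB t = 1 := by simp [ht, hts, htv]
        have hsat : pvScanA "satisfied" (t :: ts) = pvScanA "satisfied" ts := by
          simp [pvScanA, hts]
        have hviol : pvScanA "violated" (t :: ts) = some t := by simp [pvScanA, htv]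
        by_cases hm01 : pvKeyB m ≤ 1
        · have hlt : ¬ pvKeyB t < pvKeyB m := by omega
          rw [if_neg hlt, ih m hm, hsat, hviol]
          split_ifs <;> first | rfl | omega
        · have hlt : pvKeyB t < pvKeyB m := by omega
          have hm2 : pvKeyB m = 2 := by omega
          rw [if_pos hlt, ih t (by omega), hsat, hviol, if_neg (by omega : ¬ pvKeyB t = 0),
            if_pos htk, if_neg (by omega : ¬ pvKeyB m = 0), if_neg (by omega : ¬ pvKeyB m = 1)]
          cases pvScanA "satisfied" ts <;> simp
      · have htk : pvKeyB t = 2 := by simp [ht, hts, htv]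
        have hsat : pvScanA "satisfied" (t :: ts) = pvScanA "satisfied" ts := by
          simp [pvScanA, hts]
        have hviol : pvScanA "violated" (t :: ts) = pvScanA "violated" ts := by
          simp [pvScanA, htv]
        have hlt : ¬ pvKeyB t < pvKeyB m := by omega
        rw [if_neg hlt, ih m hm, hsat, hviol]

-- ===== VERDICT (by name: the statement is the Claim_ definition above) =====
theorem select_carrier_result_py_spec : Claim_equal_select_carrier_result_py := by
  intro evaluations _ hpre
  unfold Spec_select_carrier_result_py select_carrier_result_py select_carrier_result_py_alt
  cases evaluations with
  | nil => exact absurd rfl hpre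
  | cons e es =>
    have hk := pvKeyB_eq e
    have hle : pvKeyB e ≤ 2 := by rw [hk]; split_ifs <;> omega
    rw [pvMinFold es e hle]
    by_cases hs : e.2.1 == "satisfied"
    · have h0 : pvKeyB e = 0 := by simp [hk, hs]
      simp [h0, pvScanA, hs]
    · by_cases hv : e.2.1 == "violated"
      · have h1 : pvKeyB e = 1 := by simp [hk, hs, hv]
        rw [if_neg (by omega : ¬ pvKeyB e = 0), if_pos h1]
        simp only [pvScanA, hs, hv, Bool.false_eq_true, ite_false]
        cases pvScanA "satisfied" es <;> simp
      · have h2 : pvKeyB e = 2 := by simp [hk, hs, hv]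
        rw [if_neg (by omega : ¬ pvKeyB e = 0), if_neg (by omega : ¬ pvKeyB e = 1)]
        simp only [pvScanA, hs, hv, Bool.false_eq_true, ite_false]
        cases pvScanA "satisfied" es <;> cases pvScanA "violated" es <;>
          simp [PySem.List.pyGet?, PySem.List.pyIdx?]
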